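-- pv_equiv track=rewrite | github.com/AndrewHonor/HLL_pro | HW_12/main.py | new_format
-- ===== SOURCE A (Python) =====
-- def new_format(string):
--
--     len_x = len(string)
--     if len_x <= 3:
--         return string
--     pars_string = ""
--
--     for i in range(len_x):
--         if i > 0 and (len_x - i) % 3 == 0:
--             pars_string +=  "."+string[i]
--         else:
--             pars_string += string[i]
--     return pars_string
-- ===== SOURCE B (Python) =====
-- def new_format(string):
--     n = len(string)
--     if n <= 3:
--         return string
--     head = n % 3
--     parts = []
--     if head:
--         parts.append(string[:head])
--     for i in range(head, n, 3):
--         parts.append(string[i:i+3])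
--     return ".".join(parts)
-- ===== Notes on version B (the rewrite author's own statement) =====
-- stated objective: alternative
-- what changed: B computes the head length (len mod 3) once and builds the result by joining fixed three-character slices, instead of A's per-character loop that tests a modulo condition at every index and concatenates one character at a time.
import Mathlib
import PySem

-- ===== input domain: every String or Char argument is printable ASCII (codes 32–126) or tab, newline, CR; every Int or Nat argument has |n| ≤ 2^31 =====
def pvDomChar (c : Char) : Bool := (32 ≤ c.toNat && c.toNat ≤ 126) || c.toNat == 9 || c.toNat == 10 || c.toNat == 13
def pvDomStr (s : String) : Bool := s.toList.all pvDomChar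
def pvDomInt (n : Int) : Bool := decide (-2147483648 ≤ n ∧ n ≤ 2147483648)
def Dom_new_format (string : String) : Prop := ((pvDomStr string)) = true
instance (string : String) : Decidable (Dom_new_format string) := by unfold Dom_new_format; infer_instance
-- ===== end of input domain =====

-- B builds the result by joining fixed three-character slices (head of length len mod 3 first),
-- replacing A's per-character modulo-and-concatenate loop (objective: alternative decomposition).

-- ===== PORT A =====
-- string[i] as a one-character piece (i is always in range in A's loop)
def cellA (s : List Char) (i : Int) : List Char :=
  match PySem.List.pyGet? s i with
  | some c => [c]
  | none => []

def new_format (string : String) : String :=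
  let len_x : Int := (string.toList.length : Int)
  if len_x ≤ 3 then string
  else
    String.ofList ((PySem.List.pyRange 0 len_x 1).foldl
      (fun pars_string i =>
        if 0 < i ∧ PySem.Int.mod (len_x - i) 3 = 0 then
          pars_string ++ '.' :: cellA string.toList i
        else
          pars_string ++ cellA string.toList i) [])

-- ===== PORT B =====
def new_format_alt (string : String) : String :=
  let n : Int := (string.toList.length : Int)
  if n ≤ 3 then string
  else
    let head : Int := PySem.Int.mod n 3
    let parts : List (List Char) :=
      (if head ≠ 0 then [PySem.List.slice string.toList none (some head)] else []) ++
      (PySem.List.pyRange head n 3).map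
        (fun i => PySem.List.slice string.toList (some i) (some (i + 3)))
    String.ofList (PySem.Chars.join ['.'] parts)

-- ===== PRECONDITION & SPEC =====
def Spec_new_format (string : String) (out : String) : Prop := out = new_format_alt string
instance (string : String) (out : String) : Decidable (Spec_new_format string out) := by unfold Spec_new_format; infer_instance

-- ===== CLAIM (what is proved, stated in full; the proofs are below) =====
def Claim_equal_new_format : Prop := ∀ (string : String), Dom_new_format string → Spec_new_format string (new_format string)

-- ===== LEMMAS AND PROOFS =====

-- A's loop body with the accumulator factored out
def dCell (n : Int) (s : List Char) (i : Int) : List Char :=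
  if 0 < i ∧ PySem.Int.mod (n - i) 3 = 0 then '.' :: cellA s i else cellA s i

theorem cellA_eq (s : List Char) (k : Nat) (h : k < s.length) :
    cellA s (k : Int) = [s[k]] := by
  simp [cellA, h]

-- step-3 range peels one element at the front
theorem pyRange3_cons (a b : Int) (h : a < b) :
    PySem.List.pyRange a b 3 = a :: PySem.List.pyRange (a + 3) b 3 := by
  rw [PySem.List.pyRange_of_pos a b (by norm_num),
      PySem.List.pyRange_of_pos (a + 3) b (by norm_num)]
  by_cases h3 : a + 3 < b
  · have hc : ((b - a + 3 - 1) / 3).toNat = ((b - (a + 3) + 3 - 1) / 3).toNat + 1 := by omega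
    rw [if_pos h, if_pos h3, hc, List.range_succ_eq_map]
    simp [List.map_map, Function.comp]
    intro k _; ring
  · have hb : b - a ≤ 3 := by omega
    have hc : ((b - a + 3 - 1) / 3).toNat = 1 := by omega
    rw [if_pos h, if_neg h3, hc]
    simp

-- the leading head of the loop: no dot is ever inserted before index k
theorem flatMap_head (s : List Char) (k : Nat) (hk : k ≤ s.length) :
    (PySem.List.pyRange 0 (k : Int) 1).flatMap (cellA s) = s.take k := by
  induction k with
  | zero => simp [PySem.List.pyRange_one_eq_nil]
  | succ k ih =>
      have hcast : ((k + 1 : Nat) : Int) = (k : Int) + 1 := by push_cast; ring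
      rw [hcast, PySem.List.pyRange_one_succ_right (by positivity), List.flatMap_append]
      rw [ih (by omega)]
      have hlt : k < s.length := by omega
      have htake : s.take (k + 1) = s.take k ++ [s[k]] := by
        rw [List.take_add_one, List.getElem?_eq_getElem hlt]; rfl
      rw [htake, List.flatMap_cons, List.flatMap_nil, cellA_eq s k hlt, List.append_nil]

theorem dCell_head (s : List Char) (k : Nat) (hk3 : k ≤ 3)
    (hdvd : (3 : Int) ∣ ((s.length : Int) - k)) :
    (PySem.List.pyRange 0 (k : Int) 1).flatMap (dCell (s.length : Int) s) =
      (PySem.List.pyRange 0 (k : Int) 1).flatMap (cellA s) := by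
  rw [List.flatMap_def, List.flatMap_def]
  refine congrArg List.flatten (List.map_congr_left ?_)
  intro i hi
  rw [PySem.List.mem_pyRange_one] at hi
  unfold dCell
  rw [if_neg]
  rintro ⟨hpos, hmod⟩
  rw [PySem.Int.mod_eq_zero_iff_dvd] at hmod
  obtain ⟨c, hc⟩ := hdvd
  obtain ⟨d, hd⟩ := hmod
  omega

-- the tail of A's loop (a whole number of 3-chunks) is B's dotted chunks
theorem chunks_eq (t : Nat) : ∀ (s : List Char) (k : Nat), 0 < k → k + 3 * t = s.length →
    (PySem.List.pyRange (k : Int) (s.length : Int) 1).flatMap (dCell (s.length : Int) s) =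
      (PySem.List.pyRange (k : Int) (s.length : Int) 3).flatMap
        (fun i => '.' :: PySem.List.slice s (some i) (some (i + 3))) := by
  induction t with
  | zero =>
      intro s k _ hlen
      have : (k : Int) = (s.length : Int) := by omega
      rw [this, PySem.List.pyRange_one_eq_nil le_rfl,
          PySem.List.pyRange_of_pos _ _ (by norm_num : (0:Int) < 3)]
      simp
  | succ t ih =>
      intro s k hk hlen
      have h1 : (k : Int) < (s.length : Int) := by omega
      have h2 : (k : Int) + 1 < (s.length : Int) := by omega
      have h3 : (k : Int) + 1 + 1 < (s.length : Int) := by omega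
      rw [PySem.List.pyRange_one_cons h1, PySem.List.pyRange_one_cons h2,
          PySem.List.pyRange_one_cons h3, pyRange3_cons _ _ h1]
      simp only [List.flatMap_cons]
      have hk1 : k < s.length := by omega
      have hk2 : k + 1 < s.length := by omega
      have hk3 : k + 2 < s.length := by omega
      -- the three dCell values of this chunk
      have e0 : dCell (s.length : Int) s (k : Int) = '.' :: [s[k]] := by
        unfold dCell
        rw [if_pos ⟨by exact_mod_cast hk, by
              rw [PySem.Int.mod_eq_zero_iff_dvd]; exact ⟨(t : Int) + 1, by omega⟩⟩,
            cellA_eq s k hk1]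
      have e1 : dCell (s.length : Int) s ((k : Int) + 1) = [s[k+1]] := by
        unfold dCell
        rw [if_neg, show ((k : Int) + 1) = ((k + 1 : Nat) : Int) by push_cast; ring,
            cellA_eq s (k+1) hk2]
        rintro ⟨-, hmod⟩
        rw [PySem.Int.mod_eq_zero_iff_dvd] at hmod
        obtain ⟨d, hd⟩ := hmod; omega
      have e2 : dCell (s.length : Int) s ((k : Int) + 1 + 1) = [s[k+2]] := by
        unfold dCell
        rw [if_neg, show ((k : Int) + 1 + 1) = ((k + 2 : Nat) : Int) by push_cast; ring,
            cellA_eq s (k+2) hk3]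
        rintro ⟨-, hmod⟩
        rw [PySem.Int.mod_eq_zero_iff_dvd] at hmod
        obtain ⟨d, hd⟩ := hmod; omega
      have eslice : PySem.List.slice s (some (k : Int)) (some ((k : Int) + 3)) =
          [s[k], s[k+1], s[k+2]] := by
        rw [PySem.List.slice_toNat s (by positivity) (by positivity)]
        have ht : ((k : Int) + 3).toNat = k + 3 := by omega
        have hkt : ((k : Int)).toNat = k := by omega
        rw [ht, hkt]
        have hdrop : s.drop k = s[k] :: s[k+1] :: s[k+2] :: s.drop (k + 3) := by
          rw [← List.getElem_cons_drop hk1]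
          have d1 : s.drop (k + 1) = s[k+1] :: s.drop (k + 2) := by
            rw [← List.getElem_cons_drop hk2]
          have d2 : s.drop (k + 2) = s[k+2] :: s.drop (k + 3) := by
            rw [← List.getElem_cons_drop hk3]
          rw [d1, d2]
        rw [hdrop, show k + 3 - k = 3 from by omega]
        rfl
      have ihk : (PySem.List.pyRange ((k + 3 : Nat) : Int) (s.length : Int) 1).flatMap
            (dCell (s.length : Int) s) =
          (PySem.List.pyRange ((k + 3 : Nat) : Int) (s.length : Int) 3).flatMap
            (fun i => '.' :: PySem.List.slice s (some i) (some (i + 3))) :=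
        ih s (k + 3) (by omega) (by omega)
      rw [show ((k + 3 : Nat) : Int) = (k : Int) + 1 + 1 + 1 by push_cast; ring] at ihk
      rw [e0, e1, e2, eslice,
          show (k : Int) + 3 = (k : Int) + 1 + 1 + 1 by ring, ihk]
      simp

-- '.'-join of a head part and mapped chunks, as a flatMap
theorem join_dot (p : List Char) (l : List Int) (f : Int → List Char) :
    PySem.Chars.join ['.'] (p :: l.map f) = p ++ l.flatMap (fun i => '.' :: f i) := by
  induction l generalizing p with
  | nil => simp [PySem.Chars.join_singleton]
  | cons a l ih =>
      rw [List.map_cons, PySem.Chars.join_cons_cons, ih (f a)]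
      simp

-- the common core: A's loop characters = B's joined parts (length > 3)
theorem core_eq (s : List Char) (h3 : 3 < s.length) :
    ((PySem.List.pyRange 0 (s.length : Int) 1).foldl
      (fun pars i =>
        if 0 < i ∧ PySem.Int.mod ((s.length : Int) - i) 3 = 0 then
          pars ++ '.' :: cellA s i
        else pars ++ cellA s i) []) =
    PySem.Chars.join ['.']
      ((if PySem.Int.mod (s.length : Int) 3 ≠ 0 then
          [PySem.List.slice s none (some (PySem.Int.mod (s.length : Int) 3))] else []) ++
        (PySem.List.pyRange (PySem.Int.mod (s.length : Int) 3) (s.length : Int) 3).map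
          (fun i => PySem.List.slice s (some i) (some (i + 3)))) := by
  have hmod : PySem.Int.mod (s.length : Int) 3 = ((s.length % 3 : Nat) : Int) := by
    exact_mod_cast PySem.Int.mod_natCast s.length 3
  -- the split point k : head size if nonzero, else 3
  set k : Nat := if s.length % 3 = 0 then 3 else s.length % 3 with hkdef
  have hk0 : 0 < k := by by_cases h : s.length % 3 = 0 <;> simp [hkdef, h]; omega
  have hk3 : k ≤ 3 := by by_cases h : s.length % 3 = 0 <;> simp [hkdef, h]; omega
  have hkd : ∃ t : Nat, k + 3 * t = s.length := by
    by_cases h : s.length % 3 = 0 <;> simp [hkdef, h] <;> [exact ⟨s.length / 3 - 1, by omega⟩;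
      exact ⟨s.length / 3, by omega⟩]
  obtain ⟨t, ht⟩ := hkd
  -- left side : foldl → flatMap, split at k
  have hbody : (fun (pars : List Char) (i : Int) =>
      if 0 < i ∧ PySem.Int.mod ((s.length : Int) - i) 3 = 0 then
        pars ++ '.' :: cellA s i
      else pars ++ cellA s i) = fun pars i => pars ++ dCell (s.length : Int) s i := by
    funext pars i; unfold dCell; split_ifs <;> rfl
  rw [hbody,
      PySem.List.foldl_append_eq_flatMap, List.nil_append,
      PySem.List.pyRange_one_append 0 (k : Int) (s.length : Int) (by positivity) (by omega),
      List.flatMap_append,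
      dCell_head s k hk3 ⟨(t : Int), by omega⟩,
      flatMap_head s k (by omega),
      chunks_eq t s k hk0 ht]
  -- right side
  by_cases h0 : s.length % 3 = 0
  · have hk : k = 3 := by simp [hkdef, h0]
    have hm0 : PySem.Int.mod (s.length : Int) 3 = 0 := by rw [hmod, h0]; rfl
    rw [hm0]
    simp only [ne_eq, not_true_eq_false, if_false, List.nil_append]
    rw [pyRange3_cons 0 (s.length : Int) (by omega), List.map_cons, join_dot]
    have : PySem.List.slice s (some 0) (some (0 + 3)) = s.take 3 := by
      rw [PySem.List.slice_toNat s (by norm_num) (by norm_num)]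
      simp
    rw [this, hk]
    norm_num
  · have hk : k = s.length % 3 := by simp [hkdef, h0]
    have hmne : PySem.Int.mod (s.length : Int) 3 ≠ 0 := by
      rw [hmod]; exact_mod_cast h0
    rw [if_pos hmne, List.singleton_append, join_dot]
    have hsl : PySem.List.slice s none (some (PySem.Int.mod (s.length : Int) 3)) = s.take k := by
      rw [hmod, PySem.List.slice_to s (by positivity)]
      simp [hk]
      omega
    rw [hsl, hmod, ← hk]

-- ===== VERDICT (by name: the statement is the Claim_ definition above) =====
theorem new_format_spec : Claim_equal_new_format := by
  intro string _
  unfold Spec_new_format new_format new_format_alt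
  by_cases h : ((string.toList.length : Int) ≤ 3)
  · simp only [h, if_true]
  · simp only [h, if_false]
    exact congrArg String.ofList (core_eq string.toList (by omega))
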